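-- pv_equiv track=rewrite | github.com/gcpreston/aoc-2020 | day12.py | handle_letter_part2
-- ===== SOURCE A (Python) =====
-- from typing import List, Tuple
--
-- def handle_letter_part2(p: Tuple[int, int], waypoint: Tuple[int, int], letter: str, num: int) -> Tuple[Tuple[int, int], Tuple[int, int]]:
--   new_p = p
--   new_waypoint = waypoint
--   deg_to_dir = {0: 'E', 90: 'N', 180: 'W', 270: 'S'}
--
--   if letter == 'N':
--     new_waypoint = (waypoint[0], waypoint[1] + num)
--   elif letter == 'S':
--     new_waypoint = (waypoint[0], waypoint[1] - num)
--   elif letter == 'E':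
--     new_waypoint = (waypoint[0] + num, waypoint[1])
--   elif letter == 'W':
--     new_waypoint = (waypoint[0] - num, waypoint[1])
--   elif letter == 'L':
--     if num == 90:
--       new_waypoint = (-1 * waypoint[1], waypoint[0])
--     elif num == 180:
--       new_waypoint = (-1 * waypoint[0], -1 * waypoint[1])
--     elif num == 270:
--       new_waypoint = (waypoint[1], -1 * waypoint[0])
--     else:
--       new_waypoint = waypoint
--   elif letter == 'R':
--     if num == 90:
--       new_waypoint = (waypoint[1], -1 * waypoint[0])
--     elif num == 180:
--       new_waypoint = (-1 * waypoint[0], -1 * waypoint[1])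
--     elif num == 270:
--       new_waypoint = (-1 * waypoint[1], waypoint[0])
--     else:
--       new_waypoint = waypoint
--   elif letter == 'F':
--     for _ in range(num):
--       new_p = (new_p[0] + waypoint[0], new_p[1] + waypoint[1])
--
--   return new_p, new_waypoint
-- ===== SOURCE B (Python) =====
-- def handle_letter_part2(p, waypoint, letter, num):
--     # Direction moves as vectors; rotations as repeated 90-degree-left turns;
--     # the F loop replaced by a single multiplication.
--     moves = {'N': (0, 1), 'S': (0, -1), 'E': (1, 0), 'W': (-1, 0)}
--     if letter in moves:
--         dx, dy = moves[letter]
--         return p, (waypoint[0] + dx * num, waypoint[1] + dy * num)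
--     if (letter == 'L' or letter == 'R') and num in (90, 180, 270):
--         k = (num if letter == 'L' else 360 - num) // 90
--         w = waypoint
--         for _ in range(k):
--             w = (-w[1], w[0])
--         return p, w
--     if letter == 'F' and num > 0:
--         return (p[0] + waypoint[0] * num, p[1] + waypoint[1] * num), waypoint
--     return p, waypoint
-- ===== Notes on version B (the rewrite author's own statement) =====
-- stated objective: alternative
-- what changed: Replaced the per-letter tuple formulas and the O(num) F-loop by a direction-vector table with scalar multiplication, a unified left-rotation loop (at most 3 steps) for L/R, and a closed-form p + waypoint*num for F.
import Mathlib
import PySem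

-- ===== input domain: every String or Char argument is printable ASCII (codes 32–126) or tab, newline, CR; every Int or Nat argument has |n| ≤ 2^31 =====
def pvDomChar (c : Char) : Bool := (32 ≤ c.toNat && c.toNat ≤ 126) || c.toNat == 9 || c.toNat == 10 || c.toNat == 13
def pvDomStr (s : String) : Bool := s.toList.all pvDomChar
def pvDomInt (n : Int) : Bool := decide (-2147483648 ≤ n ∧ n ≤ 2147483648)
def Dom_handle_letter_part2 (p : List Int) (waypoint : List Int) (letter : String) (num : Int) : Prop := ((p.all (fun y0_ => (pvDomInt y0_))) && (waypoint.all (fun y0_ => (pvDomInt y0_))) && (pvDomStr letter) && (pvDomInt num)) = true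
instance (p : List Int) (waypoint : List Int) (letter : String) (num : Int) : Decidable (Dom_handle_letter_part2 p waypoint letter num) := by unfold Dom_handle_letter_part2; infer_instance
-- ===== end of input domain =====

-- B replaces the per-letter tuple formulas and the num-iteration F-loop by a direction table,
-- a ≤3-step rotation loop and the closed form p + waypoint*num (objective: alternative).

-- ===== PORT A =====
-- xs[i] with i = 0,1 guaranteed in range by Pre_; default 0 is never used inside Pre_
def pvG (xs : List Int) (i : Int) : Int := PySem.List.pyGetD xs i 0

def handle_letter_part2 (p : List Int) (waypoint : List Int) (letter : String) (num : Int) : List (List Int) :=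
  if letter = "N" then [p, [pvG waypoint 0, pvG waypoint 1 + num]]
  else if letter = "S" then [p, [pvG waypoint 0, pvG waypoint 1 - num]]
  else if letter = "E" then [p, [pvG waypoint 0 + num, pvG waypoint 1]]
  else if letter = "W" then [p, [pvG waypoint 0 - num, pvG waypoint 1]]
  else if letter = "L" then
    if num = 90 then [p, [-1 * pvG waypoint 1, pvG waypoint 0]]
    else if num = 180 then [p, [-1 * pvG waypoint 0, -1 * pvG waypoint 1]]
    else if num = 270 then [p, [pvG waypoint 1, -1 * pvG waypoint 0]]
    else [p, waypoint]
  else if letter = "R" then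
    if num = 90 then [p, [pvG waypoint 1, -1 * pvG waypoint 0]]
    else if num = 180 then [p, [-1 * pvG waypoint 0, -1 * pvG waypoint 1]]
    else if num = 270 then [p, [-1 * pvG waypoint 1, pvG waypoint 0]]
    else [p, waypoint]
  else if letter = "F" then
    -- for _ in range(num): new_p = (new_p[0]+waypoint[0], new_p[1]+waypoint[1])
    [(List.range num.toNat).foldl
       (fun np _ => [pvG np 0 + pvG waypoint 0, pvG np 1 + pvG waypoint 1]) p,
     waypoint]
  else [p, waypoint]

-- ===== PORT B =====
def pvMoves : PySem.Dict String (Int × Int) :=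
  PySem.Dict.ofList [("N", (0, 1)), ("S", (0, -1)), ("E", (1, 0)), ("W", (-1, 0))]

def handle_letter_part2_alt (p : List Int) (waypoint : List Int) (letter : String) (num : Int) : List (List Int) :=
  match pvMoves.get? letter with
  | some d => [p, [pvG waypoint 0 + d.1 * num, pvG waypoint 1 + d.2 * num]]
  | none =>
    if (letter = "L" ∨ letter = "R") ∧ (num = 90 ∨ num = 180 ∨ num = 270) then
      let k := PySem.Int.floordiv (if letter = "L" then num else 360 - num) 90
      [p, (List.range k.toNat).foldl (fun w _ => [-(pvG w 1), pvG w 0]) waypoint]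
    else if letter = "F" ∧ 0 < num then
      [[pvG p 0 + pvG waypoint 0 * num, pvG p 1 + pvG waypoint 1 * num], waypoint]
    else [p, waypoint]

-- ===== PRECONDITION & SPEC =====
-- Pre_ excludes exactly the inputs where Python A raises IndexError:
-- the branches that index waypoint (N/S/E/W, and L/R with num in {90,180,270}) need len(waypoint) ≥ 2,
-- and F with num ≥ 1 needs len(p) ≥ 2 and len(waypoint) ≥ 2.
def Pre_handle_letter_part2 (p : List Int) (waypoint : List Int) (letter : String) (num : Int) : Prop :=
  ((letter = "N" ∨ letter = "S" ∨ letter = "E" ∨ letter = "W") → 2 ≤ waypoint.length) ∧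
  ((letter = "L" ∨ letter = "R") ∧ (num = 90 ∨ num = 180 ∨ num = 270) → 2 ≤ waypoint.length) ∧
  (letter = "F" ∧ 1 ≤ num → 2 ≤ p.length ∧ 2 ≤ waypoint.length)
instance (p : List Int) (waypoint : List Int) (letter : String) (num : Int) : Decidable (Pre_handle_letter_part2 p waypoint letter num) := by unfold Pre_handle_letter_part2; infer_instance

def pvWitness_handle_letter_part2 : List Int × List Int × String × Int := ([0, 0], [10, 1], "F", 3)

def Spec_handle_letter_part2 (p : List Int) (waypoint : List Int) (letter : String) (num : Int) (out : List (List Int)) : Prop := out = handle_letter_part2_alt p waypoint letter num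
instance (p : List Int) (waypoint : List Int) (letter : String) (num : Int) (out : List (List Int)) : Decidable (Spec_handle_letter_part2 p waypoint letter num out) := by unfold Spec_handle_letter_part2; infer_instance

-- ===== CLAIM (what is proved, stated in full; the proofs are below) =====
def Claim_equal_handle_letter_part2 : Prop := ∀ (p : List Int) (waypoint : List Int) (letter : String) (num : Int), Dom_handle_letter_part2 p waypoint letter num → Pre_handle_letter_part2 p waypoint letter num → Spec_handle_letter_part2 p waypoint letter num (handle_letter_part2 p waypoint letter num)

-- ===== LEMMAS AND PROOFS =====

theorem pvG_pair_zero (a b : Int) : pvG [a, b] 0 = a := by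
  simp [pvG]

theorem pvG_pair_one (a b : Int) : pvG [a, b] 1 = b := by
  simp [pvG, PySem.List.pyGetD]

-- the F-loop, run n ≥ 1 times, reaches the closed form
theorem fold_F (p : List Int) (w0 w1 : Int) :
    ∀ n : Nat, 1 ≤ n →
      (List.range n).foldl (fun np _ => [pvG np 0 + w0, pvG np 1 + w1]) p =
        [pvG p 0 + w0 * n, pvG p 1 + w1 * n] := by
  intro n
  induction n with
  | zero => omega
  | succ m ih =>
    intro _
    by_cases hm : 1 ≤ m
    · rw [List.range_succ, List.foldl_append, ih hm]
      simp [pvG_pair_zero, pvG_pair_one]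
      push_cast
      constructor <;> ring
    · have : m = 0 := by omega
      subst this
      simp

theorem handle_letter_part2_spec : Claim_equal_handle_letter_part2 := by
  intro p waypoint letter num _ _
  unfold Spec_handle_letter_part2 handle_letter_part2 handle_letter_part2_alt
  by_cases hN : letter = "N"
  · subst hN
    have h : pvMoves.get? "N" = some (0, 1) := by decide
    simp [h]
  by_cases hS : letter = "S"
  · subst hS
    have h : pvMoves.get? "S" = some (0, -1) := by decide
    simp [h]; ring
  by_cases hE : letter = "E"
  · subst hE
    have h : pvMoves.get? "E" = some (1, 0) := by decide
    simp [h]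
  by_cases hW : letter = "W"
  · subst hW
    have h : pvMoves.get? "W" = some (-1, 0) := by decide
    simp [h]; ring
  have hnone : pvMoves.get? letter = none := by
    have hmk : pvMoves = PySem.Dict.mk [("N", (0, 1)), ("S", (0, -1)), ("E", (1, 0)), ("W", (-1, 0))] := by decide
    simp [hmk, Ne.symm hN, Ne.symm hS, Ne.symm hE, Ne.symm hW, PySem.Dict.get?]
  by_cases hL : letter = "L"
  · subst hL
    simp only [hnone]
    by_cases h90 : num = 90
    · subst h90; simp [List.range_succ, pvG_pair_zero, pvG_pair_one]
    by_cases h180 : num = 180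
    · subst h180; simp [List.range_succ, pvG_pair_zero, pvG_pair_one]
    by_cases h270 : num = 270
    · subst h270; simp [List.range_succ, pvG_pair_zero, pvG_pair_one]
    · simp [h90, h180, h270]
  by_cases hR : letter = "R"
  · subst hR
    simp only [hnone]
    by_cases h90 : num = 90
    · subst h90; simp [List.range_succ, pvG_pair_zero, pvG_pair_one]
    by_cases h180 : num = 180
    · subst h180; simp [List.range_succ, pvG_pair_zero, pvG_pair_one]
    by_cases h270 : num = 270
    · subst h270; simp [List.range_succ, pvG_pair_zero, pvG_pair_one]
    · simp [h90, h180, h270]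
  by_cases hF : letter = "F"
  · subst hF
    simp only [hnone]
    by_cases hpos : 0 < num
    · have h1 : 1 ≤ num.toNat := by omega
      rw [fold_F p (pvG waypoint 0) (pvG waypoint 1) num.toNat h1]
      have hc : ((num.toNat : Int)) = num := by omega
      simp [hc, hpos]
    · have h0 : num.toNat = 0 := by omega
      simp [h0, hN, hS, hE, hW, hL, hR, hpos]
  · simp [hnone, hN, hS, hE, hW, hL, hR, hF]
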